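-- pv_equiv track=rewrite | github.com/ShapeLayer/training | tasks/online_judge/baekjoon/python/1236.py | compute
-- ===== SOURCE A (Python) =====
-- def compute(n: int, m: int, gets: list[str]) -> int:
--     vert, hori = [False for _i in range(n)], [False for _i in range(m)]
--     for i in range(n):
--         for j in range(m):
--             if gets[i][j] == 'X':
--                 vert[i] = True
--                 hori[j] = True
--     v, h = 0, 0
--     for each in vert:
--         if not each:
--             v += 1
--     for each in hori:
--         if not each:
--             h += 1
--     return max(v, h)
-- ===== SOURCE B (Python) =====
-- def compute(n: int, m: int, gets: list[str]) -> int: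
--     empty_rows = sum(1 for i in range(n) if all(gets[i][j] != 'X' for j in range(m)))
--     empty_cols = sum(1 for j in range(m) if all(gets[i][j] != 'X' for i in range(n)))
--     return max(empty_rows, empty_cols)
-- ===== Notes on version B (the rewrite author's own statement) =====
-- stated objective: simpler
-- what changed: Replaced the mutable marking arrays (setting vert[i]/hori[j] inside a combined double loop, then counting False entries) by two direct comprehension passes that count empty rows and empty columns with all()-scans.
import Mathlib
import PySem

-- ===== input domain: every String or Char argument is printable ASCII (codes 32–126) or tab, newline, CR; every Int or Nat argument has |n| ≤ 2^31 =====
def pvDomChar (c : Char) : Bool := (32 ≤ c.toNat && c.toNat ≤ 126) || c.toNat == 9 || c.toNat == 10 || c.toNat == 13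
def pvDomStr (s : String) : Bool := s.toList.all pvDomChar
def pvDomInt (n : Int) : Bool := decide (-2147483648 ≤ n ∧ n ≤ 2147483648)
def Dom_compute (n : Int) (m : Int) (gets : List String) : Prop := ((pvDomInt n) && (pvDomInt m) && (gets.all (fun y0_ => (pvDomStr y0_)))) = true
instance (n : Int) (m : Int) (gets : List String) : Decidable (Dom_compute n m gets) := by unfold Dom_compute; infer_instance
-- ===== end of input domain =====

-- B replaces A's mutable marking arrays (one combined double loop setting vert[i]/hori[j], then
-- two counting loops over the bool arrays) by two direct counting passes with all()-scans: simpler.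

-- ===== PORT A =====
-- shared indexing helper: gets[i][j]; total via defaults, in range under Pre_compute
def cell (gets : List String) (i j : Int) : Char :=
  (PySem.Str.pyGet? (PySem.List.pyGetD gets i "") j).getD ' '

def compute (n : Int) (m : Int) (gets : List String) : Int :=
  let vert0 := (PySem.List.pyRange 0 n 1).map (fun _ => false)
  let hori0 := (PySem.List.pyRange 0 m 1).map (fun _ => false)
  let vh := (PySem.List.pyRange 0 n 1).foldl (fun vh i =>
      (PySem.List.pyRange 0 m 1).foldl (fun vh j =>
        if cell gets i j = 'X' then
          (PySem.List.pySetD vh.1 i true, PySem.List.pySetD vh.2 j true)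
        else vh) vh) (vert0, hori0)
  let v := vh.1.foldl (fun acc b => if !b then acc + 1 else acc) (0 : Int)
  let h := vh.2.foldl (fun acc b => if !b then acc + 1 else acc) (0 : Int)
  max v h

-- ===== PORT B =====
def rowEmpty (gets : List String) (m : Int) (i : Int) : Bool :=
  (PySem.List.pyRange 0 m 1).all (fun j => cell gets i j != 'X')

def colEmpty (gets : List String) (n : Int) (j : Int) : Bool :=
  (PySem.List.pyRange 0 n 1).all (fun i => cell gets i j != 'X')

def compute_alt (n : Int) (m : Int) (gets : List String) : Int :=
  let emptyRows := ((PySem.List.pyRange 0 n 1).countP (fun i => rowEmpty gets m i) : Int)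
  let emptyCols := ((PySem.List.pyRange 0 m 1).countP (fun j => colEmpty gets n j) : Int)
  max emptyRows emptyCols

-- ===== PRECONDITION & SPEC =====
-- Pre_: exactly where Python A returns normally; it raises IndexError when the double loop runs
-- (n > 0 and m > 0) and some of the first n rows is missing or shorter than m.
def Pre_compute (n : Int) (m : Int) (gets : List String) : Prop :=
  n ≤ 0 ∨ m ≤ 0 ∨ (n ≤ PySem.List.len gets ∧ ∀ s ∈ gets.take n.toNat, m ≤ PySem.Str.len s)
instance (n : Int) (m : Int) (gets : List String) : Decidable (Pre_compute n m gets) := by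
  unfold Pre_compute; infer_instance

def pvWitness_compute : Int × Int × List String := (2, 2, ["X.", ".."])

def Spec_compute (n : Int) (m : Int) (gets : List String) (out : Int) : Prop := out = compute_alt n m gets
instance (n : Int) (m : Int) (gets : List String) (out : Int) : Decidable (Spec_compute n m gets out) := by unfold Spec_compute; infer_instance

-- ===== CLAIM (what is proved, stated in full; the proofs are below) =====
def Claim_equal_compute : Prop := ∀ (n : Int) (m : Int) (gets : List String), Dom_compute n m gets → Pre_compute n m gets → Spec_compute n m gets (compute n m gets)

-- ===== LEMMAS AND PROOFS =====

-- setting index j of a bool array represented as a map over range(0, b)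
lemma pySetD_map_pyRange (g : Int → Bool) (b j : Int) (v : Bool) (h0 : 0 ≤ j) :
    PySem.List.pySetD ((PySem.List.pyRange 0 b 1).map g) j v
      = (PySem.List.pyRange 0 b 1).map (fun x => if x = j then v else g x) := by
  rw [PySem.List.pySetD_of_nonneg _ _ h0]
  apply List.ext_getElem
  · simp
  · intro k hk1 hk2
    simp only [List.getElem_set, List.getElem_map, PySem.List.getElem_pyRange_one]
    have hzk : (0 : Int) + (k : Int) = (k : Int) := by omega
    rw [hzk]
    split_ifs with hA hB hB
    · rfl
    · omega
    · omega
    · rfl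

-- inner loop over columns of one fixed row i
lemma inner_fold (gets : List String) (n m i : Int) (hi0 : 0 ≤ i) (k : Nat) :
    ∀ (a : Int) (F G : Int → Bool), 0 ≤ a → (m - a).toNat = k →
    (PySem.List.pyRange a m 1).foldl (fun vh j =>
        if cell gets i j = 'X' then
          (PySem.List.pySetD vh.1 i true, PySem.List.pySetD vh.2 j true)
        else vh)
      ((PySem.List.pyRange 0 n 1).map F, (PySem.List.pyRange 0 m 1).map G)
    = ((PySem.List.pyRange 0 n 1).map (fun x =>
          F x || (x == i && (PySem.List.pyRange a m 1).any (fun j => cell gets i j == 'X'))),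
       (PySem.List.pyRange 0 m 1).map (fun y =>
          G y || (decide (a ≤ y) && (cell gets i y == 'X')))) := by
  induction k with
  | zero =>
    intro a F G ha hk
    have hma : m ≤ a := by omega
    rw [PySem.List.pyRange_one_eq_nil hma]
    simp only [List.foldl_nil, List.any_nil, Bool.and_false, Bool.or_false, Prod.mk.injEq]
    constructor
    · trivial
    · refine List.map_congr_left (fun y hy => ?_)
      have hym := (PySem.List.mem_pyRange_one).mp hy
      have hne : ¬ (a ≤ y) := by omega
      simp [hne]
  | succ k ih =>
    intro a F G ha hk
    have ham : a < m := by omega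
    rw [PySem.List.pyRange_one_cons ham]
    simp only [List.foldl_cons, List.any_cons]
    by_cases hc : cell gets i a = 'X'
    · rw [if_pos hc, pySetD_map_pyRange F n i true hi0, pySetD_map_pyRange G m a true ha,
          ih (a + 1) _ _ (by omega) (by omega)]
      have hX : (cell gets i a == 'X') = true := by simp [hc]
      simp only [Prod.mk.injEq]
      constructor
      · refine List.map_congr_left (fun x hx => ?_)
        by_cases hxi : x = i
        · simp [hxi, hX]
        · have hbi : (x == i) = false := by simp [hxi]
          simp [hbi, hxi]
      · refine List.map_congr_left (fun y hy => ?_)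
        have hym := (PySem.List.mem_pyRange_one).mp hy
        by_cases hya : y = a
        · have h2 : ¬ (a + 1 ≤ a) := by omega
          simp [hya, h2, hX]
        · have hda : decide (y = a) = false := by simp [hya]
          have hiff : (a + 1 ≤ y) ↔ (a ≤ y) := by omega
          simp [hda, hiff]
    · rw [if_neg hc, ih (a + 1) F G (by omega) (by omega)]
      have hX : (cell gets i a == 'X') = false := by simp [hc]
      simp only [Prod.mk.injEq]
      constructor
      · refine List.map_congr_left (fun x hx => ?_)
        simp [hX]
      · refine List.map_congr_left (fun y hy => ?_)
        have hym := (PySem.List.mem_pyRange_one).mp hy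
        by_cases hya : y = a
        · have h2 : ¬ (a + 1 ≤ a) := by omega
          simp [hya, h2, hX]
        · have hiff : (a + 1 ≤ y) ↔ (a ≤ y) := by omega
          simp [hiff]

-- outer loop over rows
lemma outer_fold (gets : List String) (n m : Int) (k : Nat) :
    ∀ (a : Int) (F G : Int → Bool), 0 ≤ a → (n - a).toNat = k →
    (PySem.List.pyRange a n 1).foldl (fun vh i =>
        (PySem.List.pyRange 0 m 1).foldl (fun vh j =>
          if cell gets i j = 'X' then
            (PySem.List.pySetD vh.1 i true, PySem.List.pySetD vh.2 j true)
          else vh) vh)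
      ((PySem.List.pyRange 0 n 1).map F, (PySem.List.pyRange 0 m 1).map G)
    = ((PySem.List.pyRange 0 n 1).map (fun x =>
          F x || (decide (a ≤ x) && (PySem.List.pyRange 0 m 1).any (fun j => cell gets x j == 'X'))),
       (PySem.List.pyRange 0 m 1).map (fun y =>
          G y || (PySem.List.pyRange a n 1).any (fun i => cell gets i y == 'X'))) := by
  induction k with
  | zero =>
    intro a F G ha hk
    have hna : n ≤ a := by omega
    rw [PySem.List.pyRange_one_eq_nil hna]
    simp only [List.foldl_nil, List.any_nil, Bool.or_false, Prod.mk.injEq]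
    constructor
    · refine List.map_congr_left (fun x hx => ?_)
      have hxm := (PySem.List.mem_pyRange_one).mp hx
      have hne : ¬ (a ≤ x) := by omega
      simp [hne]
    · trivial
  | succ k ih =>
    intro a F G ha hk
    have han : a < n := by omega
    rw [PySem.List.pyRange_one_cons han]
    simp only [List.foldl_cons, List.any_cons]
    rw [inner_fold gets n m a ha (m - 0).toNat 0 F G (le_refl 0) (by omega),
        ih (a + 1) _ _ (by omega) (by omega)]
    simp only [Prod.mk.injEq]
    constructor
    · refine List.map_congr_left (fun x hx => ?_)
      have hxn := (PySem.List.mem_pyRange_one).mp hx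
      by_cases hxa : x = a
      · have h2 : ¬ (a + 1 ≤ a) := by omega
        simp [hxa, h2]
      · have hba : (x == a) = false := by simp [hxa]
        have hiff : (a + 1 ≤ x) ↔ (a ≤ x) := by omega
        simp [hba, hiff]
    · refine List.map_congr_left (fun y hy => ?_)
      have hym := (PySem.List.mem_pyRange_one).mp hy
      have h0y : decide ((0 : Int) ≤ y) = true := by simp [hym.1]
      simp [h0y, Bool.or_assoc]

-- not-any('X') is the all(!= 'X') scan
lemma any_eq_not_rowEmpty (gets : List String) (m i : Int) :
    (PySem.List.pyRange 0 m 1).any (fun j => cell gets i j == 'X') = !(rowEmpty gets m i) := by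
  unfold rowEmpty
  induction (PySem.List.pyRange 0 m 1) with
  | nil => rfl
  | cons x xs ih => by_cases h : cell gets i x = 'X' <;> simp [h, ih, bne]

lemma any_eq_not_colEmpty (gets : List String) (n j : Int) :
    (PySem.List.pyRange 0 n 1).any (fun i => cell gets i j == 'X') = !(colEmpty gets n j) := by
  unfold colEmpty
  induction (PySem.List.pyRange 0 n 1) with
  | nil => rfl
  | cons x xs ih => by_cases h : cell gets x j = 'X' <;> simp [h, ih, bne]

-- ===== VERDICT (by name: the statement is the Claim_ definition above) =====
theorem compute_spec : Claim_equal_compute := by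
  intro n m gets _ _
  unfold Spec_compute compute compute_alt
  simp only
  rw [outer_fold gets n m (n - 0).toNat 0 (fun _ => false) (fun _ => false) (le_refl 0) (by omega)]
  simp only
  rw [PySem.List.foldl_if_add_one, PySem.List.foldl_if_add_one]
  simp only [List.countP_map, zero_add]
  congr 1
  · congr 1
    refine List.countP_congr (fun x hx => ?_)
    have hxn := (PySem.List.mem_pyRange_one).mp hx
    have h0x : decide ((0 : Int) ≤ x) = true := by simp [hxn.1]
    simp [Function.comp, h0x, any_eq_not_rowEmpty]
  · congr 1
    refine List.countP_congr (fun y hy => ?_)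
    simp [Function.comp, any_eq_not_colEmpty]
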